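-- pv_equiv track=rewrite | github.com/Zedmor/hackerrank-puzzles | uva/UVa_272.py | solution
-- ===== SOURCE A (Python) =====
-- def solution(arg):
--     opened = False
--     out = []
--
--     for char in arg:
--         if char != '"':
--             out.append(char)
--         elif opened:
--             out.append("''")
--             opened = False
--         else:
--             out.append("``")
--             opened = True
--
--     return ''.join(out)
-- ===== SOURCE B (Python) =====
-- def solution(arg):
--     parts = arg.split('"')
--     pieces = [parts[0]]
--     for i, seg in enumerate(parts[1:]):
--         pieces.append('``' if i % 2 == 0 else "''")
--         pieces.append(seg)
--     return ''.join(pieces)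
-- ===== Notes on version B (the rewrite author's own statement) =====
-- stated objective: faster
-- what changed: Replaces the stateful per-character loop carrying an opened flag with a split on the quote character followed by a rejoin of the segments, where the parity of the segment index decides opening versus closing TeX quotes.
import Mathlib
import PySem

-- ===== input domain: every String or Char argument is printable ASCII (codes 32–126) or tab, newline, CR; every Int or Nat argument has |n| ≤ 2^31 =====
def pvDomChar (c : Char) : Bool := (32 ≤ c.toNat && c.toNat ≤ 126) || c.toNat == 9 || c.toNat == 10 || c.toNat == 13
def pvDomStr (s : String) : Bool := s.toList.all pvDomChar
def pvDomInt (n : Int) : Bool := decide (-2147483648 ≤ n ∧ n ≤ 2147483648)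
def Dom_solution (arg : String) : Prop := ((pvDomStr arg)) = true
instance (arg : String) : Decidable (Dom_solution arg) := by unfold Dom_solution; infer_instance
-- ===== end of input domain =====

-- B replaces A's stateful per-character loop (an opened flag) by splitting on the quote
-- character and rejoining segments, segment-index parity choosing opening vs closing TeX quotes
-- (same O(n); a timing run measured B faster by a constant factor: C-level split/join).


-- ===== PORT A =====
-- one step of A's loop: state = (opened, out)
def solutionStep (st : Bool × List String) (c : Char) : Bool × List String :=
  if c ≠ '"' then (st.1, st.2 ++ [String.ofList [c]])
  else if st.1 then (false, st.2 ++ ["''"])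
  else (true, st.2 ++ ["``"])

def solution (arg : String) : String :=
  let st := arg.toList.foldl solutionStep (false, [])
  PySem.Str.join "" st.2

-- ===== PORT B =====
-- one step of B's loop over enumerate(parts[1:]): append the quote token then the segment
def solutionAltStep (acc : List Char) (iq : Int × List Char) : List Char :=
  acc ++ (if PySem.Int.mod iq.1 2 = 0 then ['`', '`'] else ['\'', '\'']) ++ iq.2

def solution_alt (arg : String) : String :=
  match arg.toList.splitOn '"' with
  | [] => ""          -- unreachable: split never returns an empty list
  | p :: rest => String.ofList ((PySem.List.enumerate rest).foldl solutionAltStep p)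

-- ===== PRECONDITION & SPEC =====
def Spec_solution (arg : String) (out : String) : Prop := out = solution_alt arg
instance (arg : String) (out : String) : Decidable (Spec_solution arg out) := by unfold Spec_solution; infer_instance

-- ===== CLAIM (what is proved, stated in full; the proofs are below) =====
def Claim_equal_solution : Prop := ∀ (arg : String), Dom_solution arg → Spec_solution arg (solution arg)

-- ===== LEMMAS AND PROOFS =====

-- the quote token emitted when the flag is o (A: opened; B: odd segment index)
def quoteTok (o : Bool) : List Char := if o then ['\'', '\''] else ['`', '`']

-- A's output characters as a direct recursion over the input characters
def gRun (o : Bool) : List Char → List Char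
  | [] => []
  | c :: cs => if c = '"' then quoteTok o ++ gRun (!o) cs else c :: gRun o cs

-- B's tail: interleave quote tokens (alternating with o) with the remaining segments
def ilv (o : Bool) : List (List Char) → List Char
  | [] => []
  | p :: t => quoteTok o ++ p ++ ilv (!o) t

theorem join_nil_flatten (ps : List (List Char)) : PySem.Chars.join [] ps = ps.flatten := by
  induction ps with
  | nil => rfl
  | cons p t ih =>
      cases t with
      | nil => simp [PySem.Chars.join, List.intercalate]
      | cons q t' => rw [PySem.Chars.join_cons_cons, ih]; simp

theorem join_mk_chars (parts : List String) :
    (PySem.Str.join "" parts).toList = (parts.map String.toList).flatten := by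
  rw [PySem.Str.toList_join]
  exact join_nil_flatten _

theorem foldA (l : List Char) (o : Bool) (acc : List String) :
    ((((l.foldl solutionStep (o, acc)).2).map String.toList).flatten) =
      ((acc.map String.toList).flatten) ++ gRun o l := by
  induction l generalizing o acc with
  | nil => simp [gRun]
  | cons c cs ih =>
      by_cases hc : c = '"'
      · subst hc
        cases o with
        | false =>
            simp only [List.foldl_cons, solutionStep, gRun, quoteTok]
            simp [ih]
        | true =>
            simp only [List.foldl_cons, solutionStep, gRun, quoteTok]
            simp [ih]
      · simp only [List.foldl_cons, solutionStep, if_pos hc, gRun, if_neg hc]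
        simp [ih, String.toList_ofList]

theorem foldB (rest : List (List Char)) (s : Int) (hs : 0 ≤ s) (acc : List Char) :
    (PySem.List.enumerate rest s).foldl solutionAltStep acc =
      acc ++ ilv (decide (PySem.Int.mod s 2 = 1)) rest := by
  induction rest generalizing s acc with
  | nil => simp [PySem.List.enumerate_nil, ilv]
  | cons p t ih =>
      rw [PySem.List.enumerate_cons, List.foldl_cons]
      rw [ih (s + 1) (by omega)]
      have h2 : PySem.Int.mod s 2 = s % 2 := PySem.Int.mod_eq_emod_of_pos (by norm_num)
      have h2' : PySem.Int.mod (s + 1) 2 = (s + 1) % 2 :=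
        PySem.Int.mod_eq_emod_of_pos (by norm_num)
      rcases Int.emod_two_eq_zero_or_one s with h | h
      · have h1 : (s + 1) % 2 = 1 := by omega
        simp only [solutionAltStep, h2, h2', h, h1]
        simp [ilv, quoteTok]
      · have h1 : (s + 1) % 2 = 0 := by omega
        simp only [solutionAltStep, h2, h2', h, h1]
        simp [ilv, quoteTok]

theorem gRun_splitOn (l : List Char) (o : Bool) (p : List Char) (t : List (List Char))
    (h : l.splitOn '"' = p :: t) : gRun o l = p ++ ilv o t := by
  induction l generalizing o p t with
  | nil =>
      simp only [List.splitOn, List.splitOnP_nil] at h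
      cases h
      simp [gRun, ilv]
  | cons c cs ih =>
      by_cases hc : c = '"'
      · subst hc
        rw [show (('"' :: cs).splitOn '"') = [] :: cs.splitOn '"' from by
              simp [List.splitOn, List.splitOnP_cons]] at h
        injection h with h1 h2
        obtain ⟨p', t', hsp⟩ : ∃ p' t', cs.splitOn '"' = p' :: t' := by
          rcases hx : cs.splitOn '"' with _ | ⟨p', t'⟩
          · exact absurd hx (List.splitOnP_ne_nil _ _)
          · exact ⟨p', t', rfl⟩
        subst h1
        rw [← h2, hsp]
        simp only [gRun, ilv, if_pos]
        rw [ih (!o) p' t' hsp]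
        simp
      · rw [show ((c :: cs).splitOn '"') = (cs.splitOn '"').modifyHead (List.cons c) from by
              simp [List.splitOn, List.splitOnP_cons, hc]] at h
        obtain ⟨p', t', hsp⟩ : ∃ p' t', cs.splitOn '"' = p' :: t' := by
          rcases hx : cs.splitOn '"' with _ | ⟨p', t'⟩
          · exact absurd hx (List.splitOnP_ne_nil _ _)
          · exact ⟨p', t', rfl⟩
        rw [hsp] at h
        simp only [List.modifyHead] at h
        injection h with h1 h2
        subst h1; subst h2
        simp only [gRun, if_neg hc]
        rw [ih o p' t' hsp]
        simp

-- ===== VERDICT (by name: the statement is the Claim_ definition above) =====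
theorem solution_spec : Claim_equal_solution := by
  intro arg _
  unfold Spec_solution
  obtain ⟨p, t, hsp⟩ : ∃ p t, arg.toList.splitOn '"' = p :: t := by
    rcases hx : arg.toList.splitOn '"' with _ | ⟨p, t⟩
    · exact absurd hx (List.splitOnP_ne_nil _ _)
    · exact ⟨p, t, rfl⟩
  have hB : solution_alt arg =
      String.ofList ((PySem.List.enumerate t).foldl solutionAltStep p) := by
    simp only [solution_alt, hsp]
  rw [hB, foldB t 0 le_rfl p]
  apply String.toList_inj.mp
  simp only [solution]
  rw [join_mk_chars, foldA arg.toList false []]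
  simp only [List.map_nil, List.flatten_nil, List.nil_append, String.toList_ofList]
  rw [gRun_splitOn arg.toList false p t hsp]
  have h0 : (decide (PySem.Int.mod 0 2 = 1)) = false := by decide
  rw [h0]
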